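-- pv_equiv track=rewrite | github.com/Anatel-Phys/GrassmannLibrary | IdentifyRecurrence.py | compare_terms
-- ===== SOURCE A (Python) =====
-- import collections
--
-- def lists_are_equal(l1, l2):
--     return collections.Counter(l1) == collections.Counter(l2)
--
-- def compare_terms(t1, t2):
--     terms1 = t1.copy()
--     terms2 = t2.copy()
--     terms_in_common = []
--
--     termsFound = True
--     #min_i = 0 wip to optimize func
--
--     while termsFound:
--         termsFound = False
--         for i in range(len(terms1)):
--             for j in range(len(terms2)):
--                 if lists_are_equal(terms1[i][1:], terms2[j][1:]):
--                     #min_i = i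
--                     cur_term1 = terms1[i]
--                     cur_term2 = terms2[j]
--                     termsFound = True
--                     break
--             if termsFound:
--                 break
--
--         if termsFound:
--             terms_in_common.append(cur_term1)
--             terms1.remove(cur_term1)
--             terms2.remove(cur_term2)
--
--     return terms_in_common, terms1, terms2
-- ===== SOURCE B (Python) =====
-- import collections
--
-- def compare_terms(t1, t2):
--     # Index terms2 positions by canonical (sorted-tail) key, then one forward pass over t1.
--     index = collections.defaultdict(collections.deque)
--     for j, term in enumerate(t2):
--         index[tuple(sorted(term[1:]))].append(j)
--     terms_in_common = []
--     rem1 = []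
--     removed = set()
--     for term in t1:
--         dq = index.get(tuple(sorted(term[1:])))
--         if dq:
--             removed.add(dq.popleft())
--             terms_in_common.append(term)
--         else:
--             rem1.append(term)
--     rem2 = [term for j, term in enumerate(t2) if j not in removed]
--     return terms_in_common, rem1, rem2
-- ===== Notes on version B (the rewrite author's own statement) =====
-- stated objective: faster
-- what changed: Replaces the restarting nested scan with Counter comparisons by a single forward pass over t1 against a precomputed index of t2 positions keyed by sorted tail, with matched positions collected in a set.
import Mathlib
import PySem

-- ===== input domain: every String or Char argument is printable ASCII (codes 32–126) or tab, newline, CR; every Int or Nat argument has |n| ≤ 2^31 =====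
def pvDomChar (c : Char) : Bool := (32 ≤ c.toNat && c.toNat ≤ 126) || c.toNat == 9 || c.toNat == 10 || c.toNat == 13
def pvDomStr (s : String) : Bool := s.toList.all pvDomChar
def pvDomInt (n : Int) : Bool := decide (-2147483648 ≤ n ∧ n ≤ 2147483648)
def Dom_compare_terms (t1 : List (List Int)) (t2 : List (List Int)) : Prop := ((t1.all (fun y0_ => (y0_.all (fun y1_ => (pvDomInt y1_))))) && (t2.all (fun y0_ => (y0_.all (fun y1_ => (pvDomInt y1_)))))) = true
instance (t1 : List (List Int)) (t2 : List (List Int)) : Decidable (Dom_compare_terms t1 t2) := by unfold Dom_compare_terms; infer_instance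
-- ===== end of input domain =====

-- B replaces A's restarting nested scan (Counter comparison of tails for every pair, restarted
-- after each removal) by one pass over t1 against a dict of t2 positions keyed by sorted tail
-- (objective: faster).

-- ===== PORT A =====
-- Counter(l1) == Counter(l2): Python dict equality compares the key->count mappings ignoring order
def lists_are_equal (l1 l2 : List Int) : Bool :=
  ((PySem.Dict.counter l1).keys.all fun k =>
      (PySem.Dict.counter l2).getD k 0 == (PySem.Dict.counter l1).getD k 0) &&
  ((PySem.Dict.counter l2).keys.all fun k =>
      (PySem.Dict.counter l1).getD k 0 == (PySem.Dict.counter l2).getD k 0)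

-- the inner 'for j in range(len(terms2))' scan for a fixed terms1[i] (t[1:] = drop 1)
def ctInnerScan (t : List Int) : List (List Int) → Option (List Int)
  | [] => none
  | u :: rest => if lists_are_equal (t.drop 1) (u.drop 1) then some u else ctInnerScan t rest

-- the nested 'for i ... for j ...' search with its two breaks: first (cur_term1, cur_term2)
def ctFindPair : List (List Int) → List (List Int) → Option (List Int × List Int)
  | [], _ => none
  | t :: rest, ts2 =>
    match ctInnerScan t ts2 with
    | some u => some (t, u)
    | none => ctFindPair rest ts2

-- the 'while termsFound' loop; the fuel only makes the recursion structural (each round that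
-- finds a pair removes one element of terms1, so len(t1) + 1 rounds always suffice — proved below).
-- list.remove is List.erase (first ==-equal element; ValueError unreachable: the element was found)
def ctWhile : Nat → List (List Int) → List (List Int) → List (List Int) →
    List (List Int) × List (List Int) × List (List Int)
  | 0, ts1, ts2, acc => (acc, ts1, ts2)
  | fuel + 1, ts1, ts2, acc =>
    match ctFindPair ts1 ts2 with
    | none => (acc, ts1, ts2)
    | some (c1, c2) => ctWhile fuel (ts1.erase c1) (ts2.erase c2) (acc ++ [c1])

def compare_terms (t1 : List (List Int)) (t2 : List (List Int)) :
    List (List Int) × List (List Int) × List (List Int) :=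
  ctWhile (t1.length + 1) t1 t2 []

-- ===== PORT B =====
-- tuple(sorted(term[1:]))
def ctKey (t : List Int) : List Int := PySem.List.sorted (t.drop 1) (fun x => x) false

-- index = defaultdict(deque); for j, term in enumerate(t2): index[key(term)].append(j)
def ctIndex (t2 : List (List Int)) : PySem.Dict (List Int) (List Int) :=
  (PySem.List.enumerate t2 0).foldl
    (fun d p => d.modify (ctKey p.2) [] (· ++ [p.1])) PySem.Dict.empty

-- loop body over t1; state = (terms_in_common, rem1, removed, index).
-- 'dq = index.get(key); if dq:' — None and the empty deque are both falsy, so both are the [] case;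
-- 'dq.popleft()' takes the deque's head, the dict keeping the shortened deque.
def ctStep
    (st : List (List Int) × List (List Int) × PySem.Set Int × PySem.Dict (List Int) (List Int))
    (term : List Int) :
    List (List Int) × List (List Int) × PySem.Set Int × PySem.Dict (List Int) (List Int) :=
  match st.2.2.2.getD (ctKey term) [] with
  | [] => (st.1, st.2.1 ++ [term], st.2.2.1, st.2.2.2)
  | j :: js => (st.1 ++ [term], st.2.1, PySem.Set.add st.2.2.1 j, st.2.2.2.insert (ctKey term) js)

def compare_terms_alt (t1 : List (List Int)) (t2 : List (List Int)) :
    List (List Int) × List (List Int) × List (List Int) :=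
  let res := t1.foldl ctStep ([], [], PySem.Set.empty, ctIndex t2)
  (res.1, res.2.1,
    ((PySem.List.enumerate t2 0).filter
        (fun p => !(PySem.Set.contains res.2.2.1 p.1))).map (·.2))

-- ===== PRECONDITION & SPEC =====
def Spec_compare_terms (t1 : List (List Int)) (t2 : List (List Int)) (out : List (List Int) × List (List Int) × List (List Int)) : Prop := out = compare_terms_alt t1 t2
instance (t1 : List (List Int)) (t2 : List (List Int)) (out : List (List Int) × List (List Int) × List (List Int)) : Decidable (Spec_compare_terms t1 t2 out) := by unfold Spec_compare_terms; infer_instance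

-- ===== CLAIM (what is proved, stated in full; the proofs are below) =====
def Claim_equal_compare_terms : Prop := ∀ (t1 : List (List Int)) (t2 : List (List Int)), Dom_compare_terms t1 t2 → Spec_compare_terms t1 t2 (compare_terms t1 t2)

-- ===== LEMMAS AND PROOFS =====

-- greedy reference recursion both ports are reduced to: one pass over ts1, each term either
-- extracting the first tail-matching entry of the (indexed) remainder of t2 or going to rem1
def ctExtract (k : List Int) : List (Int × List Int) → Option (List (Int × List Int))
  | [] => none
  | p :: rest => if ctKey p.2 = k then some rest else (ctExtract k rest).map (p :: ·)

def ctGo : List (List Int) → List (Int × List Int) →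
    List (List Int) × List (List Int) × List (Int × List Int)
  | [], r2 => ([], [], r2)
  | t :: rest, r2 =>
    match ctExtract (ctKey t) r2 with
    | some r2' => let g := ctGo rest r2'; (t :: g.1, g.2.1, g.2.2)
    | none => let g := ctGo rest r2; (g.1, t :: g.2.1, g.2.2)

-- Counter equality is tail-key (sorted-tail) equality
lemma lists_are_equal_iff (a b : List Int) : lists_are_equal a b = true ↔ a.Perm b := by
  rw [List.perm_iff_count]
  simp only [lists_are_equal, Bool.and_eq_true, List.all_eq_true, beq_iff_eq,
    PySem.Dict.getD_counter, PySem.Dict.keys_counter, PySem.Set.mem_ofList]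
  constructor
  · rintro ⟨h1, h2⟩ x
    by_cases hxa : x ∈ a
    · exact_mod_cast (h1 x hxa).symm
    · by_cases hxb : x ∈ b
      · exact_mod_cast h2 x hxb
      · rw [List.count_eq_zero_of_not_mem hxa, List.count_eq_zero_of_not_mem hxb]
  · intro h
    exact ⟨fun x _ => by exact_mod_cast (h x).symm, fun x _ => by exact_mod_cast h x⟩

lemma lists_are_equal_eq_key (t u : List Int) :
    lists_are_equal t.tail u.tail = decide (ctKey u = ctKey t) := by
  have h : lists_are_equal t.tail u.tail = true ↔ ctKey u = ctKey t := by
    rw [← List.drop_one (l := t), ← List.drop_one (l := u)]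
    rw [lists_are_equal_iff, ctKey, ctKey, PySem.List.sorted_id_eq_sorted_id_iff_perm]
    exact ⟨fun hp => hp.symm, fun hp => hp.symm⟩
  rw [Bool.eq_iff_iff]
  simpa using h

-- ctExtract characterisations
lemma ctExtract_eq_none_iff (k : List Int) (r2 : List (Int × List Int)) :
    ctExtract k r2 = none ↔ ∀ p ∈ r2, ctKey p.2 ≠ k := by
  induction r2 with
  | nil => simp [ctExtract]
  | cons p rest ih =>
    simp only [ctExtract]
    split_ifs with hp
    · simp [hp]
    · simp [Option.map_eq_none_iff, ih, hp]

lemma ctExtract_of_decomp (k : List Int) (pre suf : List (Int × List Int)) (j : Int)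
    (u : List Int) (hpre : ∀ p ∈ pre, ctKey p.2 ≠ k) (hu : ctKey u = k) :
    ctExtract k (pre ++ (j, u) :: suf) = some (pre ++ suf) := by
  induction pre with
  | nil => simp [ctExtract, hu]
  | cons q pre ih =>
    have hq := hpre q (List.mem_cons_self)
    simp only [List.cons_append, ctExtract, hq, if_false]
    rw [ih (fun p hp => hpre p (List.mem_cons_of_mem q hp))]
    rfl

lemma ctExtract_eq_some (k : List Int) (r2 r2' : List (Int × List Int))
    (h : ctExtract k r2 = some r2') :
    ∃ pre j u suf, r2 = pre ++ (j, u) :: suf ∧ (∀ p ∈ pre, ctKey p.2 ≠ k) ∧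
      ctKey u = k ∧ r2' = pre ++ suf := by
  induction r2 generalizing r2' with
  | nil => simp [ctExtract] at h
  | cons p rest ih =>
    simp only [ctExtract] at h
    split_ifs at h with hp
    · exact ⟨[], p.1, p.2, rest, by simp, by simp, hp, by simpa using h.symm⟩
    · obtain ⟨w, hw, rfl⟩ := Option.map_eq_some_iff.mp h
      obtain ⟨pre, j, u, suf, rfl, hpre, hu, rfl⟩ := ih w hw
      exact ⟨p :: pre, j, u, suf, by simp, by
        intro q hq
        rcases List.mem_cons.mp hq with rfl | hq
        · exact hp
        · exact hpre q hq, hu, by simp⟩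

-- ctInnerScan in key terms
lemma ctInnerScan_eq_none_iff (t : List Int) (ts2 : List (List Int)) :
    ctInnerScan t ts2 = none ↔ ∀ u ∈ ts2, ctKey u ≠ ctKey t := by
  induction ts2 with
  | nil => simp [ctInnerScan]
  | cons u rest ih =>
    simp only [ctInnerScan, List.drop_one, lists_are_equal_eq_key]
    split_ifs with hp
    · simp only [decide_eq_true_eq] at hp
      constructor
      · intro h; exact absurd h (by simp)
      · intro h; exact absurd hp (h u List.mem_cons_self)
    · simp only [decide_eq_true_eq] at hp
      simp [ih, hp]

lemma ctInnerScan_decomp (t u : List Int) (pre suf : List (List Int))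
    (hpre : ∀ v ∈ pre, ctKey v ≠ ctKey t) (hu : ctKey u = ctKey t) :
    ctInnerScan t (pre ++ u :: suf) = some u := by
  induction pre with
  | nil => simp [ctInnerScan, List.drop_one, lists_are_equal_eq_key, hu]
  | cons v pre ih =>
    have hv := hpre v (List.mem_cons_self)
    simp only [List.cons_append, ctInnerScan, List.drop_one, lists_are_equal_eq_key, hv,
      decide_false, Bool.false_eq_true, if_false]
    exact ih (fun w hw => hpre w (List.mem_cons_of_mem v hw))

lemma ctInnerScan_mem_key (t u : List Int) (ts2 : List (List Int))
    (h : ctInnerScan t ts2 = some u) : u ∈ ts2 ∧ ctKey u = ctKey t := by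
  induction ts2 with
  | nil => simp [ctInnerScan] at h
  | cons v rest ih =>
    simp only [ctInnerScan, List.drop_one, lists_are_equal_eq_key] at h
    split_ifs at h with hp
    · obtain rfl := Option.some_inj.mp h
      exact ⟨List.mem_cons_self, by simpa using hp⟩
    · obtain ⟨hm, hk⟩ := ih h
      exact ⟨List.mem_cons_of_mem v hm, hk⟩

lemma ctFindPair_some (ts1 ts2 : List (List Int)) (c1 c2 : List Int)
    (h : ctFindPair ts1 ts2 = some (c1, c2)) :
    c1 ∈ ts1 ∧ ctInnerScan c1 ts2 = some c2 := by
  induction ts1 with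
  | nil => simp [ctFindPair] at h
  | cons t rest ih =>
    simp only [ctFindPair] at h
    cases hs : ctInnerScan t ts2 with
    | some u =>
      rw [hs] at h
      obtain ⟨rfl, rfl⟩ := Prod.mk.injEq .. ▸ Option.some_inj.mp h
      exact ⟨List.mem_cons_self, hs⟩
    | none =>
      rw [hs] at h
      obtain ⟨hm, hsc⟩ := ih h
      exact ⟨List.mem_cons_of_mem t hm, hsc⟩

-- A's while loop carries a matchless head of terms1 along untouched
lemma ctWhile_skip (t : List Int) :
    ∀ (fuel : Nat) (rest ts2 acc : _), ctInnerScan t ts2 = none →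
    ctWhile fuel (t :: rest) ts2 acc =
      ((ctWhile fuel rest ts2 acc).1, t :: (ctWhile fuel rest ts2 acc).2.1,
        (ctWhile fuel rest ts2 acc).2.2) := by
  intro fuel
  induction fuel with
  | zero => intro rest ts2 acc h; simp [ctWhile]
  | succ f ih =>
    intro rest ts2 acc h
    have hfp : ctFindPair (t :: rest) ts2 = ctFindPair rest ts2 := by
      simp only [ctFindPair, h]
    cases hf : ctFindPair rest ts2 with
    | none => simp only [ctWhile, hfp, hf]
    | some p =>
      obtain ⟨c1, c2⟩ := p
      obtain ⟨hc1, hsc⟩ := ctFindPair_some rest ts2 c1 c2 hf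
      obtain ⟨hc2, hkey⟩ := ctInnerScan_mem_key c1 c2 ts2 hsc
      have hne : ¬ t = c1 := by
        intro hteq; rw [← hteq, h] at hsc; cases hsc
      have herase : (t :: rest).erase c1 = t :: rest.erase c1 := by
        rw [List.erase_cons_tail]; simp [hne]
      have h' : ctInnerScan t (ts2.erase c2) = none := by
        rw [ctInnerScan_eq_none_iff]
        intro u hu
        exact (ctInnerScan_eq_none_iff t ts2).mp h u (List.mem_of_mem_erase hu)
      simp only [ctWhile, hfp, hf, herase]
      exact ih (rest.erase c1) (ts2.erase c2) (acc ++ [c1]) h' 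

-- A's while loop = the reference recursion (on any enumeration r2 of terms2)
lemma ctWhile_go : ∀ (ts1 : List (List Int)) (r2 : List (Int × List Int)) (fuel : Nat)
    (acc : List (List Int)), ts1.length < fuel →
    ctWhile fuel ts1 (r2.map (·.2)) acc =
      (acc ++ (ctGo ts1 r2).1, (ctGo ts1 r2).2.1, ((ctGo ts1 r2).2.2).map (·.2)) := by
  intro ts1
  induction ts1 with
  | nil =>
    intro r2 fuel acc hf
    cases fuel with
    | zero => simp at hf
    | succ f => simp [ctWhile, ctFindPair, ctGo]
  | cons t rest ih =>
    intro r2 fuel acc hf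
    cases fuel with
    | zero => simp at hf
    | succ f =>
      cases hx : ctExtract (ctKey t) r2 with
      | none =>
        have hscan : ctInnerScan t (r2.map (·.2)) = none := by
          rw [ctInnerScan_eq_none_iff]
          intro u hu
          obtain ⟨p, hp, rfl⟩ := List.mem_map.mp hu
          exact (ctExtract_eq_none_iff _ _).mp hx p hp
        rw [ctWhile_skip t (f + 1) rest (r2.map (·.2)) acc hscan]
        rw [ih r2 (f + 1) acc (by simp at hf ⊢; omega)]
        simp only [ctGo, hx]
      | some r2' =>
        obtain ⟨pre, j, u, suf, rfl, hpre, hu, rfl⟩ := ctExtract_eq_some _ _ _ hx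
        have hpre' : ∀ v ∈ pre.map (·.2), ctKey v ≠ ctKey t := by
          intro v hv; obtain ⟨p, hp, rfl⟩ := List.mem_map.mp hv; exact hpre p hp
        have hscan : ctInnerScan t ((pre ++ (j, u) :: suf).map (·.2)) = some u := by
          rw [List.map_append, List.map_cons]
          exact ctInnerScan_decomp t u _ _ hpre' hu
        have hfp : ctFindPair (t :: rest) ((pre ++ (j, u) :: suf).map (·.2)) = some (t, u) := by
          simp only [ctFindPair, hscan]
        have hunotpre : u ∉ pre.map (·.2) := fun hmem => hpre' u hmem hu
        have herase2 : (((pre ++ (j, u) :: suf).map (·.2)).erase u) = (pre ++ suf).map (·.2) := by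
          rw [List.map_append, List.map_cons, List.erase_append_right _ hunotpre,
            List.erase_cons_head, ← List.map_append]
        simp only [ctWhile, hfp, List.erase_cons_head, herase2]
        rw [ih (pre ++ suf) f (acc ++ [t]) (by simp at hf ⊢; omega)]
        simp only [ctGo, hx]
        simp

-- the initial index is right
lemma ctIndex_getD (t2 : List (List Int)) (k : List Int) :
    (ctIndex t2).getD k [] =
      ((PySem.List.enumerate t2 0).filter (fun p => ctKey p.2 == k)).map (·.1) := by
  have hmap : ctIndex t2 = ((PySem.List.enumerate t2 0).map (fun p => (ctKey p.2, p.1))).foldl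
      (fun d q => d.modify q.1 [] (· ++ [q.2])) PySem.Dict.empty := by
    rw [List.foldl_map]
    rfl
  rw [hmap, PySem.Dict.getD_foldl_modify_append, List.filter_map]
  simp [List.map_map, Function.comp_def, PySem.Dict.getD_empty]

-- B's fold = the reference recursion, under the index/removed-set invariant
lemma ctFold_go (t2 : List (List Int)) :
    ∀ (ts1 : List (List Int)) (r2 : List (Int × List Int))
      (removed : PySem.Set Int) (index : PySem.Dict (List Int) (List Int))
      (acc1 acc2 : List (List Int)),
    (∀ k, index.getD k [] = (r2.filter (fun p => ctKey p.2 == k)).map (·.1)) →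
    (PySem.List.enumerate t2 0).filter (fun p => !(PySem.Set.contains removed p.1)) = r2 →
    (ts1.foldl ctStep (acc1, acc2, removed, index)).1 = acc1 ++ (ctGo ts1 r2).1 ∧
    (ts1.foldl ctStep (acc1, acc2, removed, index)).2.1 = acc2 ++ (ctGo ts1 r2).2.1 ∧
    (PySem.List.enumerate t2 0).filter
        (fun p => !(PySem.Set.contains (ts1.foldl ctStep (acc1, acc2, removed, index)).2.2.1 p.1))
      = (ctGo ts1 r2).2.2 := by
  intro ts1
  induction ts1 with
  | nil =>
    intro r2 removed index acc1 acc2 hIdx hRem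
    exact ⟨by simp [ctGo], by simp [ctGo], by simpa [ctGo] using hRem⟩
  | cons t rest ih =>
    intro r2 removed index acc1 acc2 hIdx hRem
    have hnodup : (r2.map (·.1)).Nodup := by
      have hE : ((PySem.List.enumerate t2 0).map (·.1)).Nodup := by
        rw [PySem.List.map_fst_enumerate]
        exact PySem.List.nodup_pyRange_one _ _
      have hsub : r2.Sublist (PySem.List.enumerate t2 0) := hRem ▸ List.filter_sublist
      exact hE.sublist (hsub.map _)
    have hk := hIdx (ctKey t)
    cases hfil : r2.filter (fun p => ctKey p.2 == ctKey t) with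
    | nil =>
      have hgetD : index.getD (ctKey t) [] = [] := by rw [hk, hfil]; rfl
      have hx : ctExtract (ctKey t) r2 = none := by
        rw [ctExtract_eq_none_iff]
        intro p hp
        simpa using List.filter_eq_nil_iff.mp hfil p hp
      have hstep : ctStep (acc1, acc2, removed, index) t =
          (acc1, acc2 ++ [t], removed, index) := by
        simp only [ctStep, hgetD]
      rw [List.foldl_cons, hstep]
      obtain ⟨h1, h2, h3⟩ := ih r2 removed index acc1 (acc2 ++ [t]) hIdx hRem
      have hgo : ctGo (t :: rest) r2 =
          ((ctGo rest r2).1, t :: (ctGo rest r2).2.1, (ctGo rest r2).2.2) := by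
        simp [ctGo, hx]
      rw [hgo]
      exact ⟨h1, by rw [h2]; simp, h3⟩
    | cons q qs =>
      obtain ⟨pre, suf, rfl, hpre, hq, hsuf⟩ := List.filter_eq_cons_iff.mp hfil
      have hqkey : ctKey q.2 = ctKey t := by simpa using hq
      have hprekey : ∀ p ∈ pre, ctKey p.2 ≠ ctKey t := by
        intro p hp; simpa using hpre p hp
      have hgetD : index.getD (ctKey t) [] = q.1 :: qs.map (·.1) := by
        rw [hk, hfil]; rfl
      have hx : ctExtract (ctKey t) (pre ++ q :: suf) = some (pre ++ suf) := by
        have h := ctExtract_of_decomp (ctKey t) pre suf q.1 q.2 hprekey hqkey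
        simpa using h
      have hstep : ctStep (acc1, acc2, removed, index) t =
          (acc1 ++ [t], acc2, PySem.Set.add removed q.1,
            index.insert (ctKey t) (qs.map (·.1))) := by
        simp only [ctStep, hgetD]
      rw [List.map_append, List.map_cons] at hnodup
      have hq1pre : q.1 ∉ pre.map (·.1) := by
        intro hmem
        exact List.disjoint_of_nodup_append hnodup hmem List.mem_cons_self
      have hq1suf : q.1 ∉ suf.map (·.1) := by
        have h := (List.nodup_append.mp hnodup).2.1
        exact (List.nodup_cons.mp h).1
      have hIdx' : ∀ k, (index.insert (ctKey t) (qs.map (·.1))).getD k [] =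
          ((pre ++ suf).filter (fun p => ctKey p.2 == k)).map (·.1) := by
        intro k
        by_cases hk' : k = ctKey t
        · subst hk'
          rw [PySem.Dict.getD_insert_self]
          have hprefil : pre.filter (fun p => ctKey p.2 == ctKey t) = [] :=
            List.filter_eq_nil_iff.mpr (fun p hp => by simpa using hprekey p hp)
          rw [List.filter_append, hprefil, hsuf]
          simp
        · rw [PySem.Dict.getD_insert_of_ne, hIdx k]
          · have hqk : (ctKey q.2 == k) = false := by
              rw [beq_eq_false_iff_ne, hqkey]
              exact fun h => hk' h.symm
            rw [List.filter_append, List.filter_cons, hqk, List.filter_append]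
            simp
          · exact hk'
      have hcontains : ∀ x : Int, PySem.Set.contains (PySem.Set.add removed q.1) x
          = ((x == q.1) || PySem.Set.contains removed x) := by
        intro x
        rw [Bool.eq_iff_iff]
        simp [PySem.Set.mem_add, or_comm]
      have hRem' : (PySem.List.enumerate t2 0).filter
          (fun p => !(PySem.Set.contains (PySem.Set.add removed q.1) p.1)) = pre ++ suf := by
        have h1 : (PySem.List.enumerate t2 0).filter
            (fun p => !(PySem.Set.contains (PySem.Set.add removed q.1) p.1))
            = ((PySem.List.enumerate t2 0).filter
                (fun p => !(PySem.Set.contains removed p.1))).filter (fun p => !(p.1 == q.1)) := by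
          rw [List.filter_filter]
          refine List.filter_congr ?_
          intro p _
          rw [hcontains p.1]
          cases hpq : (p.1 == q.1) <;> cases hcr : PySem.Set.contains removed p.1 <;> simp
        rw [h1, hRem, List.filter_append, List.filter_cons]
        have hqq : (!(q.1 == q.1)) = false := by simp
        rw [hqq]
        have hfpre : pre.filter (fun p => !(p.1 == q.1)) = pre :=
          List.filter_eq_self.mpr (fun p hp => by
            have hne : p.1 ≠ q.1 := fun he => hq1pre (List.mem_map.mpr ⟨p, hp, he⟩)
            simp [hne])
        have hfsuf : suf.filter (fun p => !(p.1 == q.1)) = suf :=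
          List.filter_eq_self.mpr (fun p hp => by
            have hne : p.1 ≠ q.1 := fun he => hq1suf (List.mem_map.mpr ⟨p, hp, he⟩)
            simp [hne])
        rw [hfpre, hfsuf]
        simp
      rw [List.foldl_cons, hstep]
      obtain ⟨h1, h2, h3⟩ := ih (pre ++ suf) (PySem.Set.add removed q.1)
        (index.insert (ctKey t) (qs.map (·.1))) (acc1 ++ [t]) acc2 hIdx' hRem'
      have hgo : ctGo (t :: rest) (pre ++ q :: suf) =
          (t :: (ctGo rest (pre ++ suf)).1, (ctGo rest (pre ++ suf)).2.1,
            (ctGo rest (pre ++ suf)).2.2) := by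
        simp [ctGo, hx]
      rw [hgo]
      exact ⟨by rw [h1]; simp, h2, h3⟩

-- ===== VERDICT (by name: the statement is the Claim_ definition above) =====
theorem compare_terms_spec : Claim_equal_compare_terms := by
  intro t1 t2 _
  show compare_terms t1 t2 = compare_terms_alt t1 t2
  have hA := ctWhile_go t1 (PySem.List.enumerate t2 0) (t1.length + 1) [] (by omega)
  rw [PySem.List.map_snd_enumerate] at hA
  have hB := ctFold_go t2 t1 (PySem.List.enumerate t2 0) PySem.Set.empty (ctIndex t2) [] []
    (fun k => ctIndex_getD t2 k)
    (by simp [PySem.Set.empty, PySem.Set.contains])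
  obtain ⟨h1, h2, h3⟩ := hB
  simp only [compare_terms, compare_terms_alt, hA, h1, h2, h3, List.nil_append]
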